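-- pv_equiv track=rewrite | github.com/christian-doucette/code_breaker | test_n_gram.py | get_ext_order
-- ===== SOURCE A (Python) =====
-- def to_ids_uppercase(text: str, n: int):
--     start_tokens       = (n-1) * [26]
--     text_letter_tokens = [ord(letter) - 65 for letter in text]
--     end_tokens         = [27]
--     return start_tokens + text_letter_tokens + end_tokens
--
-- def get_ext_order(cipher_text: str, n: int):
--         # ext_order is the order in which letter substitutions will be guessed,
--         # for now just sorting by letter frequency in ciphertext
--
--         ext_order = []
--         while len(ext_order) < 26:
--             # greedily chooses letter in most valid n-grams at each step
--             max_letter = ""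
--             max_letter_num_grams = -1
--
--             for alphabet_letter in "ABCDEFGHIJKLMNOPQRSTUVWXYZ":
--                 if alphabet_letter not in ext_order:
--                     num_grams_for_this_letter = 0
--
--                     text_words = cipher_text.split()
--                     for word in text_words:
--                         letter_ids = to_ids_uppercase(word, n)
--                         for i in range(0, len(word) + 1):
--                             this_ids = tuple(letter_ids[i:i+5])
--                             is_valid_gram = True
--                             for id in this_ids:
--                                 if id not in [ord(ext_letter) - 65 for ext_letter in ext_order] and id != 26 and id != 27 and id != ord(alphabet_letter) - 65:
--                                      is_valid_gram = False
--
--                             if is_valid_gram: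
--                                 num_grams_for_this_letter += 1
--
--
--                     if max_letter_num_grams < num_grams_for_this_letter:
--                         max_letter_num_grams = num_grams_for_this_letter
--                         max_letter           = alphabet_letter
--
--
--             ext_order.append(max_letter)
--
--         return ext_order
-- ===== SOURCE B (Python) =====
-- def get_ext_order(cipher_text: str, n: int):
--     # Incremental greedy: grams already fully covered by the chosen letters add the
--     # same constant to every candidate's score, so the argmax only depends on the
--     # grams with exactly ONE missing letter. We keep, per viable gram, its list of
--     # still-missing letter ids, and a count[c] = number of grams whose only missing
--     # letter is c, updated incrementally after each pick instead of recounting.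
--     missing = []
--     for word in cipher_text.split():
--         ids = [26] * (n - 1) + [ord(ch) - 65 for ch in word] + [27]
--         for i in range(len(word) + 1):
--             g = []
--             for t in ids[i:i + 5]:
--                 if t != 26 and t != 27 and t not in g:
--                     g.append(t)
--             if g and all(0 <= t < 26 for t in g):
--                 missing.append(g)
--     count = [0] * 26
--     for g in missing:
--         if len(g) == 1:
--             count[g[0]] += 1
--     chosen = [False] * 26
--     order = []
--     for _ in range(26):
--         best, best_count = -1, -1
--         for c in range(26):
--             if not chosen[c] and best_count < count[c]:
--                 best, best_count = c, count[c]
--         chosen[best] = True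
--         order.append(chr(best + 65))
--         new_missing = []
--         for g in missing:
--             if best in g:
--                 g = [t for t in g if t != best]
--                 if len(g) == 1:
--                     count[g[0]] += 1
--             if g:
--                 new_missing.append(g)
--         missing = new_missing
--     return order
-- ===== Notes on version B (the rewrite author's own statement) =====
-- stated objective: faster
-- what changed: B replaces A's per-round, per-candidate rescan of the whole text by an incremental greedy: since grams already fully covered by the chosen letters score every candidate equally, B keeps per viable gram its list of still-missing letter ids and a per-letter count of grams missing exactly that letter, updating both in one pass after each pick instead of recounting 26 candidates over all grams every round.
import Mathlib
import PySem

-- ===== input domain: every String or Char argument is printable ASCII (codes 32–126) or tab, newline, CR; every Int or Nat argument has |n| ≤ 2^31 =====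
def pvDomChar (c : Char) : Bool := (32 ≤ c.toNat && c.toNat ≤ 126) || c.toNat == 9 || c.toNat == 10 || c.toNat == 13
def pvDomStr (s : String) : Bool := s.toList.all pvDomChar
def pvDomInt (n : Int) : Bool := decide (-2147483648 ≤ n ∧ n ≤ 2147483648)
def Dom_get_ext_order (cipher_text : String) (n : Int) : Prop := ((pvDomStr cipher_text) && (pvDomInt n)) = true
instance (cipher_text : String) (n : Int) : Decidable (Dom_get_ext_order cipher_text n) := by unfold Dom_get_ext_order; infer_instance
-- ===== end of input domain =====

-- B replaces A's per-round, per-candidate rescan of the whole text by an incremental greedy: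
-- grams fully covered by the chosen letters score every candidate equally, so B only tracks,
-- per viable gram, its still-missing letters, and a count per letter of the grams missing
-- exactly that letter, updated after each pick; measurably faster. Equivalence of the return
-- value is proved on all inputs in Dom.

-- ===== PORT A =====
-- ord(ext_letter) for the single-character strings A stores in ext_order (Python ord on a 1-char str).
def pvOrdS (s : String) : Int :=
  match s.toList with
  | [c] => (c.toNat : Int)
  | _ => 0

-- (n-1) * [26] + [ord(letter) - 65 for letter in text] + [27]; Python's list*k is empty for k ≤ 0,
-- exactly Int.toNat's clamping.
def to_ids_uppercase (text : String) (n : Int) : List Int :=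
  List.replicate (n - 1).toNat 26 ++ text.toList.map (fun c => (c.toNat : Int) - 65) ++ [27]

-- body of A's candidate loop: number of valid grams for letter `al` given the current ext_order
def pvNumGrams (cipher_text : String) (n : Int) (ext_order : List String) (al : Char) : Int :=
  (PySem.Str.split₀ cipher_text).foldl (fun num word =>
    let letter_ids := to_ids_uppercase word n
    (PySem.List.pyRange 0 ((word.toList.length : Int) + 1) 1).foldl (fun num2 i =>
      let this_ids := PySem.List.slice letter_ids (some i) (some (i + 5))
      let is_valid := this_ids.foldl (fun v id =>
        if id ∉ ext_order.map (fun e => pvOrdS e - 65) ∧ id ≠ 26 ∧ id ≠ 27 ∧ id ≠ (al.toNat : Int) - 65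
        then false else v) true
      if is_valid then num2 + 1 else num2) num) 0

-- one iteration of A's while-loop: scan the alphabet for the (first) letter with the most valid grams
def pvStepA (cipher_text : String) (n : Int) (ext_order : List String) : List String :=
  let m := "ABCDEFGHIJKLMNOPQRSTUVWXYZ".toList.foldl (fun (acc : String × Int) al =>
    if String.ofList [al] ∉ ext_order then
      let c := pvNumGrams cipher_text n ext_order al
      if acc.2 < c then (String.ofList [al], c) else acc
    else acc) ("", -1)
  ext_order ++ [m.1]

-- `while len(ext_order) < 26`: every iteration appends exactly one element, so fuel 26 from []
-- together with the guard reproduces the loop exactly.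
def pvLoopA (cipher_text : String) (n : Int) : Nat → List String → List String
  | 0, eo => eo
  | fuel + 1, eo => if eo.length < 26 then pvLoopA cipher_text n fuel (pvStepA cipher_text n eo) else eo

def get_ext_order (cipher_text : String) (n : Int) : List String :=
  pvLoopA cipher_text n 26 []

-- ===== PORT B =====
-- inner loop building g: the distinct non-boundary ids of one 5-slice, in order
def pvDedup (s : List Int) : List Int :=
  s.foldl (fun g t => if t ≠ 26 ∧ t ≠ 27 ∧ t ∉ g then g ++ [t] else g) []

-- the viable grams: nonempty, all ids real letters
def pvGrams0 (ct : String) (nn : Int) : List (List Int) :=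
  (PySem.Str.split₀ ct).foldl (fun ms word =>
    let ids : List Int := List.replicate (nn - 1).toNat 26
                          ++ word.toList.map (fun ch => (ch.toNat : Int) - 65) ++ [27]
    (PySem.List.pyRange 0 ((word.toList.length : Int) + 1) 1).foldl (fun ms2 i =>
      let g := pvDedup (PySem.List.slice ids (some i) (some (i + 5)))
      if g ≠ [] ∧ g.all (fun t => decide (0 ≤ t ∧ t < 26)) = true then ms2 ++ [g] else ms2) ms) []

-- count[t] += 1
def pvBump (cnt : Int → Int) (t : Int) : Int → Int := fun x => if x = t then cnt t + 1 else cnt x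

-- for g in missing: if len(g) == 1: count[g[0]] += 1
def pvInitCount (ms : List (List Int)) : Int → Int :=
  ms.foldl (fun cnt g => if g.length = 1 then pvBump cnt (g.headD 0) else cnt) (fun _ => 0)

-- for c in range(26): if not chosen[c] and best_count < count[c]: best, best_count = c, count[c]
def pvSelect (chosen : Int → Bool) (cnt : Int → Int) : Int × Int :=
  (PySem.List.pyRange 0 26 1).foldl (fun best c =>
    if chosen c = false ∧ best.2 < cnt c then (c, cnt c) else best) (-1, -1)

-- the update loop over missing: strip b from each gram, bump the count of a new singleton,
-- keep the nonempty grams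
def pvUpdBody (b : Int) (acc : (Int → Int) × List (List Int)) (g : List Int) :
    (Int → Int) × List (List Int) :=
  let g' := if b ∈ g then g.filter (fun t => decide (t ≠ b)) else g
  let cnt' := if b ∈ g ∧ g'.length = 1 then pvBump acc.1 (g'.headD 0) else acc.1
  if g' ≠ [] then (cnt', acc.2 ++ [g']) else (cnt', acc.2)

def pvUpdate (b : Int) (cnt : Int → Int) (missing : List (List Int)) :
    (Int → Int) × List (List Int) :=
  missing.foldl (pvUpdBody b) (cnt, [])

-- one round: select, mark chosen, append the letter, update counts and missing
def pvRound (st : List String × (Int → Bool) × (Int → Int) × List (List Int)) :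
    List String × (Int → Bool) × (Int → Int) × List (List Int) :=
  let best := (pvSelect st.2.1 st.2.2.1).1
  let upd := pvUpdate best st.2.2.1 st.2.2.2
  (st.1 ++ [String.ofList [Char.ofNat (best + 65).toNat]],
   fun t => if t = best then true else st.2.1 t, upd.1, upd.2)

def get_ext_order_alt (cipher_text : String) (n : Int) : List String :=
  let missing := pvGrams0 cipher_text n
  ((List.range 26).foldl (fun st _ => pvRound st)
    ([], fun _ => false, pvInitCount missing, missing)).1

-- ===== PRECONDITION & SPEC =====
def Spec_get_ext_order (cipher_text : String) (n : Int) (out : List String) : Prop := out = get_ext_order_alt cipher_text n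
instance (cipher_text : String) (n : Int) (out : List String) : Decidable (Spec_get_ext_order cipher_text n out) := by unfold Spec_get_ext_order; infer_instance

-- ===== CLAIM (what is proved, stated in full; the proofs are below) =====
def Claim_equal_get_ext_order : Prop := ∀ (cipher_text : String) (n : Int), Dom_get_ext_order cipher_text n → Spec_get_ext_order cipher_text n (get_ext_order cipher_text n)

-- ===== LEMMAS AND PROOFS =====

-- the single-character string A stores for chosen letter id x
def pvStrOfId (x : Int) : String := String.ofList [Char.ofNat (x + 65).toNat]

-- g minus the chosen ids l (what is still missing from gram g)
def pvFmiss (l : List Int) (g : List Int) : List Int := g.filter (fun t => decide (t ∉ l))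

def pvPne (g : List Int) : Bool := decide (g ≠ [])

-- ghost view of B's missing list after the ids in l have been chosen
def pvMissOf (gr : List (List Int)) (l : List Int) : List (List Int) :=
  (gr.map (pvFmiss l)).filter pvPne

-- number of grams missing exactly the letter c
def pvM (gr : List (List Int)) (l : List Int) (c : Int) : Int :=
  (gr.countP (fun g => decide (pvFmiss l g = [c])) : Int)

-- number of grams already fully covered
def pvK (gr : List (List Int)) (l : List Int) : Int :=
  (gr.countP (fun g => decide (pvFmiss l g = [])) : Int)

def pvChosenOf (l : List Int) : Int → Bool := fun t => decide (t ∈ l)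

-- every dedup'd 5-slice of the text, unfiltered
def pvAll (ct : String) (nn : Int) : List (List Int) :=
  (PySem.Str.split₀ ct).flatMap (fun w =>
    (PySem.List.pyRange 0 ((w.toList.length : Int) + 1) 1).map (fun i =>
      pvDedup (PySem.List.slice (to_ids_uppercase w nn) (some i) (some (i + 5)))))

def pvViable (g : List Int) : Bool := pvPne g && g.all (fun t => decide (0 ≤ t ∧ t < 26))

-- number of empty dedup'd slices (they count for every candidate in A)
def pvE (ct : String) (nn : Int) : Int := ((pvAll ct nn).countP (fun g => decide (g = [])) : Int)

-- invariant on the list of chosen ids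
def pvInv (l : List Int) : Prop := l.Nodup ∧ ∀ x ∈ l, 0 ≤ x ∧ x < 26

lemma pv_toNat_ofNat (m : Nat) (h : m < 55296) : (Char.ofNat m).toNat = m := by
  unfold Char.ofNat Char.ofNatAux
  rw [dif_pos (Or.inl h)]
  simp [Char.toNat]

lemma pvOrdS_strOfId (x : Int) (h0 : 0 ≤ x) (h1 : x < 26) : pvOrdS (pvStrOfId x) = x + 65 := by
  unfold pvOrdS pvStrOfId
  have hlt : (x + 65).toNat < 55296 := by omega
  simp [pv_toNat_ofNat _ hlt]
  omega

lemma pvStrOfId_inj (x y : Int) (hx0 : 0 ≤ x) (hx1 : x < 26) (hy0 : 0 ≤ y) (hy1 : y < 26)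
    (h : pvStrOfId x = pvStrOfId y) : x = y := by
  have := congrArg pvOrdS h
  rw [pvOrdS_strOfId x hx0 hx1, pvOrdS_strOfId y hy0 hy1] at this
  omega

-- membership in the dedup fold
lemma pvDedup_mem_aux (s : List Int) : ∀ (acc : List Int) (t : Int),
    t ∈ s.foldl (fun g t => if t ≠ 26 ∧ t ≠ 27 ∧ t ∉ g then g ++ [t] else g) acc ↔
      t ∈ acc ∨ (t ∈ s ∧ t ≠ 26 ∧ t ≠ 27) := by
  induction s with
  | nil => intro acc t; simp
  | cons x r ih =>
    intro acc t
    rw [List.foldl_cons]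
    by_cases hx : x ≠ 26 ∧ x ≠ 27 ∧ x ∉ acc
    · rw [if_pos hx, ih]
      simp only [List.mem_append, List.mem_cons, List.not_mem_nil, or_false]
      rcases hx with ⟨h1, h2, _⟩
      constructor
      · rintro ((h | h) | ⟨h, hp⟩)
        · exact Or.inl h
        · exact Or.inr ⟨Or.inl h, h ▸ h1, h ▸ h2⟩
        · exact Or.inr ⟨Or.inr h, hp⟩
      · rintro (h | ⟨h | h, hp⟩)
        · exact Or.inl (Or.inl h)
        · exact Or.inl (Or.inr h)
        · exact Or.inr ⟨h, hp⟩
    · rw [if_neg hx, ih]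
      simp only [List.mem_cons]
      constructor
      · rintro (h | ⟨h, hp⟩)
        · exact Or.inl h
        · exact Or.inr ⟨Or.inr h, hp⟩
      · rintro (h | ⟨h | h, hp⟩)
        · exact Or.inl h
        · subst h
          by_cases hacc : t ∈ acc
          · exact Or.inl hacc
          · exact absurd ⟨hp.1, hp.2, hacc⟩ hx
        · exact Or.inr ⟨h, hp⟩

lemma pvDedup_mem (s : List Int) (t : Int) : t ∈ pvDedup s ↔ t ∈ s ∧ t ≠ 26 ∧ t ≠ 27 := by
  unfold pvDedup
  rw [pvDedup_mem_aux]
  simp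

lemma pvDedup_nodup_aux (s : List Int) : ∀ (acc : List Int), acc.Nodup →
    (s.foldl (fun g t => if t ≠ 26 ∧ t ≠ 27 ∧ t ∉ g then g ++ [t] else g) acc).Nodup := by
  induction s with
  | nil => intro acc h; exact h
  | cons x r ih =>
    intro acc h
    rw [List.foldl_cons]
    by_cases hx : x ≠ 26 ∧ x ≠ 27 ∧ x ∉ acc
    · rw [if_pos hx]
      refine ih _ ?_
      rw [List.nodup_append]
      exact ⟨h, List.nodup_singleton _, by simpa using fun a ha (hax : a = x) => hx.2.2 (hax ▸ ha)⟩
    · rw [if_neg hx]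
      exact ih _ h

lemma pvDedup_nodup (s : List Int) : (pvDedup s).Nodup := by
  exact pvDedup_nodup_aux s [] List.nodup_nil

-- a nodup list all of whose elements are j is [] or [j]
lemma pv_small (j : Int) : ∀ (h : List Int), h.Nodup → (∀ t ∈ h, t = j) → h = [] ∨ h = [j] := by
  intro h hnd hall
  match h with
  | [] => exact Or.inl rfl
  | a :: t =>
    have ha : a = j := hall a List.mem_cons_self
    have ht : t = [] := by
      by_contra hne
      match t, hne with
      | b :: t', _ =>
        have hb : b = j := hall b (List.mem_cons_of_mem _ List.mem_cons_self)
        have : a ∉ b :: t' := (List.nodup_cons.mp hnd).1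
        exact this (by rw [ha, ← hb]; exact List.mem_cons_self)
    subst ht ha
    exact Or.inr rfl

-- the flag-fold of A's innermost loop is an `all`
lemma pv_foldl_flag (P : Int → Prop) [DecidablePred P] :
    ∀ (ids : List Int) (v : Bool),
      ids.foldl (fun v id => if P id then false else v) v = (v && ids.all (fun id => !decide (P id))) := by
  intro ids
  induction ids with
  | nil => intro v; simp
  | cons x t ih =>
    intro v
    by_cases hx : P x
    · rw [List.foldl_cons, if_pos hx, ih]
      simp [hx]
    · rw [List.foldl_cons, if_neg hx, ih]
      simp [hx]

-- A's per-slice validity, in terms of the dedup'd gram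
lemma pvFlag_eq (l : List Int) (hl : pvInv l) (j : Nat) (hj : j < 26) (s : List Int) :
    s.all (fun id => !decide (id ∉ l ∧ id ≠ 26 ∧ id ≠ 27 ∧ id ≠ (j : Int))) =
      (decide (pvDedup s = []) ||
        (pvViable (pvDedup s) &&
          decide (pvFmiss l (pvDedup s) = [] ∨ pvFmiss l (pvDedup s) = [(j : Int)]))) := by
  rw [Bool.eq_iff_iff]
  simp only [List.all_eq_true, Bool.or_eq_true, Bool.and_eq_true, decide_eq_true_eq,
    pvViable, pvPne, Bool.not_eq_eq_eq_not, Bool.not_true, decide_eq_false_iff_not]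
  constructor
  · intro h
    have hmem : ∀ t ∈ pvDedup s, t ∈ l ∨ t = (j : Int) := by
      intro t ht
      rcases (pvDedup_mem s t).mp ht with ⟨hts, h26, h27⟩
      have := h t hts
      tauto
    by_cases hg : pvDedup s = []
    · exact Or.inl hg
    · refine Or.inr ⟨⟨hg, ?_⟩, ?_⟩
      · intro t ht
        rcases hmem t ht with hc | hc
        · exact hl.2 t hc
        · constructor <;> omega
      · have hnd : (pvFmiss l (pvDedup s)).Nodup := List.Nodup.filter _ (pvDedup_nodup s)
        refine pv_small (j : Int) _ hnd ?_
        intro t ht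
        rcases List.mem_filter.mp ht with ⟨htg, htl⟩
        rcases hmem t htg with hc | hc
        · exact absurd hc (by simpa using htl)
        · exact hc
  · rintro h id hid ⟨hnl, h26, h27, hnj⟩
    have hidg : id ∈ pvDedup s := (pvDedup_mem s id).mpr ⟨hid, h26, h27⟩
    rcases h with hg | ⟨⟨_, _⟩, hf⟩
    · rw [hg] at hidg
      exact absurd hidg (List.not_mem_nil)
    · have hidf : id ∈ pvFmiss l (pvDedup s) := List.mem_filter.mpr ⟨hidg, by simpa using hnl⟩
      rcases hf with hf | hf
      · rw [hf] at hidf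
        exact absurd hidf (List.not_mem_nil)
      · rw [hf] at hidf
        exact hnj (by simpa using hidf)

-- countP of a disjoint disjunction splits
lemma pv_countP_disjoint {α : Type} (p q : α → Bool) :
    ∀ (xs : List α), (∀ x ∈ xs, ¬(p x = true ∧ q x = true)) →
      xs.countP (fun x => p x || q x) = xs.countP p + xs.countP q := by
  intro xs
  induction xs with
  | nil => intro _; simp
  | cons x r ih =>
    intro h
    have hx := h x List.mem_cons_self
    have hr := ih (fun y hy => h y (List.mem_cons_of_mem _ hy))
    by_cases hp : p x = true
    · have hq : q x = false := by
        cases hqv : q x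
        · rfl
        · exact absurd ⟨hp, hqv⟩ hx
      simp [hp, hq, hr]
      omega
    · simp only [Bool.not_eq_true] at hp
      by_cases hq : q x = true
      · simp [hp, hq, hr]
        omega
      · simp only [Bool.not_eq_true] at hq
        simp [hp, hq, hr]

-- grams0 is the viable slices of pvAll
lemma pvGrams0_eq (ct : String) (nn : Int) :
    pvGrams0 ct nn = (pvAll ct nn).filter pvViable := by
  unfold pvGrams0 pvAll
  suffices h : ∀ (ws : List String) (acc : List (List Int)),
      ws.foldl (fun ms word =>
        (PySem.List.pyRange 0 ((word.toList.length : Int) + 1) 1).foldl (fun ms2 i =>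
          if pvDedup (PySem.List.slice (to_ids_uppercase word nn) (some i) (some (i + 5))) ≠ [] ∧
             (pvDedup (PySem.List.slice (to_ids_uppercase word nn) (some i) (some (i + 5)))).all
               (fun t => decide (0 ≤ t ∧ t < 26)) = true
          then ms2 ++ [pvDedup (PySem.List.slice (to_ids_uppercase word nn) (some i) (some (i + 5)))]
          else ms2) ms) acc
      = acc ++ (ws.flatMap (fun w =>
          (PySem.List.pyRange 0 ((w.toList.length : Int) + 1) 1).map (fun i =>
            pvDedup (PySem.List.slice (to_ids_uppercase w nn) (some i) (some (i + 5)))))).filter pvViable by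
    have h0 := h (PySem.Str.split₀ ct) []
    rw [List.nil_append] at h0
    exact h0
  intro ws
  induction ws with
  | nil => intro acc; simp
  | cons w rest ih =>
    intro acc
    rw [List.foldl_cons, ih, List.flatMap_cons, List.filter_append, ← List.append_assoc]
    congr 1
    rw [PySem.List.foldl_append_ite
      (p := fun i => pvDedup (PySem.List.slice (to_ids_uppercase w nn) (some i) (some (i + 5))) ≠ [] ∧
        (pvDedup (PySem.List.slice (to_ids_uppercase w nn) (some i) (some (i + 5)))).all
          (fun t => decide (0 ≤ t ∧ t < 26)) = true)
      (f := fun i => pvDedup (PySem.List.slice (to_ids_uppercase w nn) (some i) (some (i + 5))))]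
    rw [List.filter_map]
    refine congrArg _ (congrArg (List.map _) (List.filter_congr ?_))
    intro i _
    rw [Bool.eq_iff_iff]
    simp [pvViable, pvPne, Function.comp]

-- A's candidate count = constant + (number of grams missing exactly that letter)
lemma pvNumGrams_eq (ct : String) (nn : Int) (l : List Int) (hl : pvInv l) (j : Nat) (hj : j < 26) :
    pvNumGrams ct nn (l.map pvStrOfId) (Char.ofNat (65 + j)) =
      (pvE ct nn + pvK (pvGrams0 ct nn) l) + pvM (pvGrams0 ct nn) l (j : Int) := by
  classical
  have hal : ((Char.ofNat (65 + j)).toNat : Int) - 65 = (j : Int) := by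
    rw [pv_toNat_ofNat _ (by omega)]
    push_cast
    ring
  have heIds : (l.map pvStrOfId).map (fun e => pvOrdS e - 65) = l := by
    rw [List.map_map]
    conv_rhs => rw [← List.map_id l]
    refine List.map_congr_left ?_
    intro x hx
    have hb := hl.2 x hx
    simp [Function.comp, pvOrdS_strOfId x hb.1 hb.2]
  have hflat : pvNumGrams ct nn (l.map pvStrOfId) (Char.ofNat (65 + j)) =
      ((pvAll ct nn).countP (fun g => decide (g = []) ||
        (pvViable g && decide (pvFmiss l g = [] ∨ pvFmiss l g = [(j : Int)]))) : Int) := by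
    unfold pvNumGrams pvAll
    simp only [heIds, hal]
    suffices h : ∀ (ws : List String) (num : Int),
        ws.foldl (fun num word =>
          (PySem.List.pyRange 0 ((word.toList.length : Int) + 1) 1).foldl (fun num2 i =>
            if (PySem.List.slice (to_ids_uppercase word nn) (some i) (some (i + 5))).foldl
                 (fun v id => if id ∉ l ∧ id ≠ 26 ∧ id ≠ 27 ∧ id ≠ (j : Int) then false else v) true = true
            then num2 + 1 else num2) num) num
        = num + ((ws.flatMap (fun w =>
            (PySem.List.pyRange 0 ((w.toList.length : Int) + 1) 1).map (fun i =>
              pvDedup (PySem.List.slice (to_ids_uppercase w nn) (some i) (some (i + 5)))))).countP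
            (fun g => decide (g = []) ||
              (pvViable g && decide (pvFmiss l g = [] ∨ pvFmiss l g = [(j : Int)]))) : Int) by
      have h0 := h (PySem.Str.split₀ ct) 0
      rw [zero_add] at h0
      exact h0
    intro ws
    induction ws with
    | nil => intro num; simp
    | cons w rest ih =>
      intro num
      rw [List.foldl_cons, ih, List.flatMap_cons, List.countP_append]
      have hw : (PySem.List.pyRange 0 ((w.toList.length : Int) + 1) 1).foldl (fun num2 i =>
            if (PySem.List.slice (to_ids_uppercase w nn) (some i) (some (i + 5))).foldl
                 (fun v id => if id ∉ l ∧ id ≠ 26 ∧ id ≠ 27 ∧ id ≠ (j : Int) then false else v) true = true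
            then num2 + 1 else num2) num
          = num + ((PySem.List.pyRange 0 ((w.toList.length : Int) + 1) 1).countP (fun i =>
              (PySem.List.slice (to_ids_uppercase w nn) (some i) (some (i + 5))).foldl
                 (fun v id => if id ∉ l ∧ id ≠ 26 ∧ id ≠ 27 ∧ id ≠ (j : Int) then false else v) true) : Int) := by
        rw [PySem.List.foldl_if_add_one]
      rw [hw]
      have hper : ((PySem.List.pyRange 0 ((w.toList.length : Int) + 1) 1).countP (fun i =>
              (PySem.List.slice (to_ids_uppercase w nn) (some i) (some (i + 5))).foldl
                 (fun v id => if id ∉ l ∧ id ≠ 26 ∧ id ≠ 27 ∧ id ≠ (j : Int) then false else v) true))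
          = (((PySem.List.pyRange 0 ((w.toList.length : Int) + 1) 1).map (fun i =>
              pvDedup (PySem.List.slice (to_ids_uppercase w nn) (some i) (some (i + 5))))).countP
              (fun g => decide (g = []) ||
                (pvViable g && decide (pvFmiss l g = [] ∨ pvFmiss l g = [(j : Int)])))) := by
        rw [List.countP_map]
        refine List.countP_congr ?_
        intro i _
        rw [pv_foldl_flag (fun id => id ∉ l ∧ id ≠ 26 ∧ id ≠ 27 ∧ id ≠ (j : Int))
          (PySem.List.slice (to_ids_uppercase w nn) (some i) (some (i + 5))) true, Bool.true_and,
          pvFlag_eq l hl j hj]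
        rfl
      rw [hper]
      push_cast
      ring
  rw [hflat]
  have hsplit1 : (pvAll ct nn).countP (fun g => decide (g = []) ||
        (pvViable g && decide (pvFmiss l g = [] ∨ pvFmiss l g = [(j : Int)])))
      = (pvAll ct nn).countP (fun g => decide (g = [])) +
        (pvAll ct nn).countP (fun g => pvViable g && decide (pvFmiss l g = [] ∨ pvFmiss l g = [(j : Int)])) := by
    refine pv_countP_disjoint _ _ _ ?_
    rintro g _ ⟨h1, h2⟩
    have hg : g = [] := by simpa using h1
    rw [hg] at h2
    simp [pvViable, pvPne] at h2
  have hsplit2 : (pvAll ct nn).countP (fun g => pvViable g && decide (pvFmiss l g = [] ∨ pvFmiss l g = [(j : Int)]))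
      = (pvGrams0 ct nn).countP (fun g => decide (pvFmiss l g = [] ∨ pvFmiss l g = [(j : Int)])) := by
    rw [pvGrams0_eq, List.countP_filter]
    refine List.countP_congr ?_
    intro g _
    rw [Bool.and_comm]
  have hsplit3 : (pvGrams0 ct nn).countP (fun g => decide (pvFmiss l g = [] ∨ pvFmiss l g = [(j : Int)]))
      = (pvGrams0 ct nn).countP (fun g => decide (pvFmiss l g = [])) +
        (pvGrams0 ct nn).countP (fun g => decide (pvFmiss l g = [(j : Int)])) := by
    rw [show (fun g => decide (pvFmiss l g = [] ∨ pvFmiss l g = [(j : Int)]))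
        = (fun g => decide (pvFmiss l g = []) || decide (pvFmiss l g = [(j : Int)])) from by
      funext g; rw [Bool.eq_iff_iff]; simp]
    refine pv_countP_disjoint _ _ _ ?_
    rintro g _ ⟨h1, h2⟩
    have h1' : pvFmiss l g = [] := by simpa using h1
    have h2' : pvFmiss l g = [(j : Int)] := by simpa using h2
    rw [h1'] at h2'
    exact absurd h2' (by simp)
  rw [hsplit1, hsplit2, hsplit3]
  unfold pvE pvK pvM
  push_cast
  ring

-- g.length = 1 ∧ g.headD 0 = c ↔ g = [c]
lemma pv_len1 (g : List Int) (c : Int) : (g.length = 1 ∧ g.headD 0 = c) ↔ g = [c] := by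
  match g with
  | [] => simp
  | [x] => simp
  | x :: y :: t => simp

-- pvInitCount pointwise
lemma pvInitCount_aux (ms : List (List Int)) : ∀ (cnt : Int → Int) (c : Int),
    (ms.foldl (fun cnt g => if g.length = 1 then pvBump cnt (g.headD 0) else cnt) cnt) c =
      cnt c + (ms.countP (fun g => decide (g = [c])) : Int) := by
  induction ms with
  | nil => intro cnt c; simp
  | cons g r ih =>
    intro cnt c
    rw [List.foldl_cons, List.countP_cons]
    by_cases hg : g.length = 1
    · rw [if_pos hg, ih]
      by_cases hc : g.headD 0 = c
      · have hgc : g = [c] := (pv_len1 g c).mp ⟨hg, hc⟩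
        rw [hc]
        simp [pvBump, hgc]
        omega
      · have hgc : ¬ g = [c] := fun h => hc ((pv_len1 g c).mpr h).2
        simp only [pvBump]
        rw [if_neg (fun h : c = g.headD 0 => hc h.symm)]
        simp [hgc]
    · rw [if_neg hg, ih]
      have hgc : ¬ g = [c] := fun h => hg ((pv_len1 g c).mpr h).1
      simp [hgc]

-- pvUpdate pointwise and structurally
lemma pvUpdate_aux (b : Int) (ms : List (List Int)) : ∀ (cnt : Int → Int) (acc : List (List Int)),
    (∀ c : Int,
      (ms.foldl (pvUpdBody b) (cnt, acc)).1 c =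
        cnt c + (ms.countP (fun g => decide (b ∈ g ∧ g.filter (fun t => decide (t ≠ b)) = [c])) : Int)) ∧
    (ms.foldl (pvUpdBody b) (cnt, acc)).2 =
      acc ++ (ms.map (fun g => g.filter (fun t => decide (t ≠ b)))).filter pvPne := by
  induction ms with
  | nil => intro cnt acc; exact ⟨fun c => by simp, by simp⟩
  | cons g r ih =>
    intro cnt acc
    have hgb : (if b ∈ g then g.filter (fun t => decide (t ≠ b)) else g) =
        g.filter (fun t => decide (t ≠ b)) := by
      by_cases hbg : b ∈ g
      · rw [if_pos hbg]
      · rw [if_neg hbg]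
        exact (List.filter_eq_self.mpr (fun t ht => by
          simp only [decide_eq_true_eq]
          exact fun h => hbg (h ▸ ht))).symm
    have hbody : pvUpdBody b (cnt, acc) g =
        ((if b ∈ g ∧ (g.filter (fun t => decide (t ≠ b))).length = 1
          then pvBump cnt ((g.filter (fun t => decide (t ≠ b))).headD 0) else cnt),
         (if g.filter (fun t => decide (t ≠ b)) ≠ []
          then acc ++ [g.filter (fun t => decide (t ≠ b))] else acc)) := by
      unfold pvUpdBody
      rw [hgb]
      by_cases hne : g.filter (fun t => decide (t ≠ b)) ≠ []
      · rw [if_pos hne, if_pos hne]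
      · rw [if_neg hne, if_neg hne]
    rw [List.foldl_cons, hbody]
    obtain ⟨ih1, ih2⟩ := ih
      (if b ∈ g ∧ (g.filter (fun t => decide (t ≠ b))).length = 1
       then pvBump cnt ((g.filter (fun t => decide (t ≠ b))).headD 0) else cnt)
      (if g.filter (fun t => decide (t ≠ b)) ≠ []
       then acc ++ [g.filter (fun t => decide (t ≠ b))] else acc)
    constructor
    · intro c
      rw [ih1 c, List.countP_cons]
      have hhead : (if b ∈ g ∧ (g.filter (fun t => decide (t ≠ b))).length = 1
          then pvBump cnt ((g.filter (fun t => decide (t ≠ b))).headD 0) else cnt) c =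
          cnt c + (if decide (b ∈ g ∧ g.filter (fun t => decide (t ≠ b)) = [c]) = true then 1 else 0) := by
        by_cases hbg : b ∈ g
        · by_cases hflt : g.filter (fun t => decide (t ≠ b)) = [c]
          · have hlh := (pv_len1 _ c).mpr hflt
            have hdec : decide (b ∈ g ∧ g.filter (fun t => decide (t ≠ b)) = [c]) = true :=
              decide_eq_true ⟨hbg, hflt⟩
            rw [if_pos ⟨hbg, hlh.1⟩, if_pos hdec]
            simp only [pvBump]
            rw [hlh.2, if_pos rfl]
          · have hdec : ¬ decide (b ∈ g ∧ g.filter (fun t => decide (t ≠ b)) = [c]) = true :=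
              fun h => hflt (of_decide_eq_true h).2
            rw [if_neg hdec]
            by_cases hlen : (g.filter (fun t => decide (t ≠ b))).length = 1
            · rw [if_pos ⟨hbg, hlen⟩]
              have hch : ¬ c = (g.filter (fun t => decide (t ≠ b))).headD 0 := fun hc =>
                hflt ((pv_len1 _ c).mp ⟨hlen, hc.symm⟩)
              simp only [pvBump]
              rw [if_neg hch]
              simp
            · rw [if_neg (fun h => hlen h.2)]
              simp
        · have hdec : ¬ decide (b ∈ g ∧ g.filter (fun t => decide (t ≠ b)) = [c]) = true :=
            fun h => hbg (of_decide_eq_true h).1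
          rw [if_neg (fun h => hbg h.1), if_neg hdec]
          simp
      rw [hhead]
      push_cast
      ring
    · rw [ih2]
      by_cases hne : g.filter (fun t => decide (t ≠ b)) = []
      · rw [if_neg (fun (h : ¬ _ = []) => h hne), List.map_cons, List.filter_cons, hne]
        simp [pvPne]
      · rw [if_pos hne, List.map_cons, List.filter_cons,
          if_pos (show pvPne (g.filter (fun t => decide (t ≠ b))) = true from decide_eq_true hne),
          List.append_assoc, List.singleton_append]

-- dropped-empty grams stay dropped
lemma pv_filter_map_filter (h : List Int → List Int) (hnil : h [] = []) :
    ∀ (xs : List (List Int)),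
      ((xs.filter pvPne).map h).filter pvPne = (xs.map h).filter pvPne := by
  intro xs
  induction xs with
  | nil => simp
  | cons g r ih =>
    by_cases hg : g = []
    · subst hg
      simp [pvPne, hnil, ih]
    · rw [List.filter_cons, if_pos (by simp [pvPne, hg]), List.map_cons, List.map_cons,
        List.filter_cons, List.filter_cons, ih]

-- removing j from the missing ids = missing ids after j is chosen
lemma pvFmiss_step (l : List Int) (j : Int) (g : List Int) :
    (pvFmiss l g).filter (fun t => decide (t ≠ j)) = pvFmiss (l ++ [j]) g := by
  unfold pvFmiss
  rw [List.filter_filter]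
  refine List.filter_congr ?_
  intro t _
  rw [Bool.eq_iff_iff]
  simp only [List.mem_append, List.mem_cons, List.not_mem_nil, or_false,
    Bool.and_eq_true, decide_eq_true_eq]
  tauto

lemma pvMissOf_step (gr : List (List Int)) (l : List Int) (j : Int) :
    ((pvMissOf gr l).map (fun g => g.filter (fun t => decide (t ≠ j)))).filter pvPne =
      pvMissOf gr (l ++ [j]) := by
  unfold pvMissOf
  rw [pv_filter_map_filter _ (by simp), List.map_map]
  congr 1
  refine List.map_congr_left ?_
  intro g _
  exact pvFmiss_step l j g

-- the incremental count update is exact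
lemma pvM_step (gr : List (List Int)) (l : List Int) (j c : Int) (hcj : c ≠ j) :
    pvM gr (l ++ [j]) c =
      pvM gr l c +
        ((pvMissOf gr l).countP (fun h => decide (j ∈ h ∧ h.filter (fun t => decide (t ≠ j)) = [c])) : Int) := by
  classical
  have h1 : (pvMissOf gr l).countP (fun h => decide (j ∈ h ∧ h.filter (fun t => decide (t ≠ j)) = [c]))
      = gr.countP (fun g => decide (j ∈ pvFmiss l g ∧ (pvFmiss l g).filter (fun t => decide (t ≠ j)) = [c])) := by
    unfold pvMissOf
    rw [List.countP_filter, List.countP_map]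
    refine List.countP_congr ?_
    intro g _
    simp only [Function.comp_apply]
    by_cases hp : j ∈ pvFmiss l g ∧ (pvFmiss l g).filter (fun t => decide (t ≠ j)) = [c]
    · have hne : pvPne (pvFmiss l g) = true := decide_eq_true (by
        intro h0
        rw [h0] at hp
        exact absurd hp.1 (List.not_mem_nil))
      rw [decide_eq_true hp, hne]
      simp
    · rw [decide_eq_false hp]
      simp
  rw [h1]
  have h2 : (fun g => decide (pvFmiss (l ++ [j]) g = [c])) =
      (fun g => decide (pvFmiss l g = [c]) ||
        decide (j ∈ pvFmiss l g ∧ (pvFmiss l g).filter (fun t => decide (t ≠ j)) = [c])) := by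
    funext g
    rw [← pvFmiss_step, Bool.eq_iff_iff]
    simp only [Bool.or_eq_true, decide_eq_true_eq]
    constructor
    · intro hf
      by_cases hjh : j ∈ pvFmiss l g
      · exact Or.inr ⟨hjh, hf⟩
      · left
        rw [← hf]
        exact (List.filter_eq_self.mpr (fun t ht => decide_eq_true (show t ≠ j from fun he => hjh (he ▸ ht)))).symm
    · rintro (hf | ⟨hjh, hf⟩)
      · rw [hf]
        simp [hcj]
      · exact hf
  unfold pvM
  rw [h2, pv_countP_disjoint _ _ _ ?_]
  · push_cast
    ring
  · rintro g _ ⟨ha, hb⟩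
    have ha' := of_decide_eq_true ha
    have hb' := of_decide_eq_true hb
    rw [ha'] at hb'
    have hjc : j = c := by simpa using hb'.1
    exact hcj hjc.symm

-- selection-scan pairing
def pvRel (l : List Int) (KK : Int) (cnt : Nat → Int) (a : String × Int) (b : Int × Int) : Prop :=
  (a.2 = -1 ∧ b.2 = -1 ∧ a.1 = "" ∧ b.1 = -1) ∨
    (∃ j : Nat, j < 26 ∧ (j : Int) ∉ l ∧ a.1 = pvStrOfId j ∧ b.1 = (j : Int) ∧
      a.2 = KK + cnt j ∧ b.2 = cnt j)

lemma pvSel_rel (l : List Int) (KK : Int) (hK : 0 ≤ KK) (cnt : Nat → Int) (hcnt : ∀ k, 0 ≤ cnt k)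
    (fa : String × Int → Nat → String × Int) (fb : Int × Int → Nat → Int × Int)
    (hfa : ∀ a k, k < 26 → fa a k = if (k : Int) ∈ l then a
      else (if a.2 < KK + cnt k then (pvStrOfId (k : Int), KK + cnt k) else a))
    (hfb : ∀ b k, k < 26 → fb b k = if (k : Int) ∈ l then b
      else (if b.2 < cnt k then ((k : Int), cnt k) else b)) :
    ∀ (idx : List Nat), (∀ k ∈ idx, k < 26) → ∀ a b, pvRel l KK cnt a b →
      pvRel l KK cnt (idx.foldl fa a) (idx.foldl fb b) := by
  intro idx
  induction idx with
  | nil => intro _ a b hab; exact hab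
  | cons k rest ih =>
    intro hk a b hab
    have hk26 : k < 26 := hk k List.mem_cons_self
    have hrest : ∀ x ∈ rest, x < 26 := fun x hx => hk x (List.mem_cons_of_mem _ hx)
    rw [List.foldl_cons, List.foldl_cons, hfa a k hk26, hfb b k hk26]
    by_cases hm : (k : Int) ∈ l
    · rw [if_pos hm, if_pos hm]
      exact ih hrest a b hab
    · rw [if_neg hm, if_neg hm]
      rcases hab with ⟨ha2, hb2, _, _⟩ | ⟨j, hj26, hjl, ha1, hb1, ha2, hb2⟩
      · have hca : a.2 < KK + cnt k := by have := hcnt k; omega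
        have hcb : b.2 < cnt k := by have := hcnt k; omega
        rw [if_pos hca, if_pos hcb]
        exact ih hrest _ _ (Or.inr ⟨k, hk26, hm, rfl, rfl, rfl, rfl⟩)
      · by_cases hlt : b.2 < cnt k
        · have hca : a.2 < KK + cnt k := by rw [ha2]; rw [hb2] at hlt; omega
          rw [if_pos hca, if_pos hlt]
          exact ih hrest _ _ (Or.inr ⟨k, hk26, hm, rfl, rfl, rfl, rfl⟩)
        · have hca : ¬ a.2 < KK + cnt k := by rw [ha2]; rw [hb2] at hlt; omega
          rw [if_neg hca, if_neg hlt]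
          exact ih hrest a b (Or.inr ⟨j, hj26, hjl, ha1, hb1, ha2, hb2⟩)

lemma pvSel_mono (l : List Int) (cnt : Nat → Int) (hcnt : ∀ k, 0 ≤ cnt k)
    (fb : Int × Int → Nat → Int × Int)
    (hfb : ∀ b k, k < 26 → fb b k = if (k : Int) ∈ l then b
      else (if b.2 < cnt k then ((k : Int), cnt k) else b)) :
    ∀ (idx : List Nat), (∀ k ∈ idx, k < 26) → ∀ b, 0 ≤ b.2 → 0 ≤ (idx.foldl fb b).2 := by
  intro idx
  induction idx with
  | nil => intro _ b hb; exact hb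
  | cons k rest ih =>
    intro hk b hb
    have hk26 : k < 26 := hk k List.mem_cons_self
    rw [List.foldl_cons, hfb b k hk26]
    by_cases hm : (k : Int) ∈ l
    · rw [if_pos hm]; exact ih (fun x hx => hk x (List.mem_cons_of_mem _ hx)) b hb
    · rw [if_neg hm]
      by_cases hlt : b.2 < cnt k
      · rw [if_pos hlt]; exact ih (fun x hx => hk x (List.mem_cons_of_mem _ hx)) _ (hcnt k)
      · rw [if_neg hlt]; exact ih (fun x hx => hk x (List.mem_cons_of_mem _ hx)) b hb

lemma pvSel_pos (l : List Int) (cnt : Nat → Int) (hcnt : ∀ k, 0 ≤ cnt k)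
    (fb : Int × Int → Nat → Int × Int)
    (hfb : ∀ b k, k < 26 → fb b k = if (k : Int) ∈ l then b
      else (if b.2 < cnt k then ((k : Int), cnt k) else b)) :
    ∀ (idx : List Nat), (∀ k ∈ idx, k < 26) → ∀ b, (∃ k ∈ idx, (k : Int) ∉ l) →
      0 ≤ (idx.foldl fb b).2 := by
  intro idx
  induction idx with
  | nil => rintro _ b ⟨k, hk, _⟩; exact absurd hk (List.not_mem_nil)
  | cons k rest ih =>
    rintro hk b ⟨k0, hk0, hk0l⟩
    have hk26 : k < 26 := hk k List.mem_cons_self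
    rw [List.foldl_cons, hfb b k hk26]
    by_cases hm : (k : Int) ∈ l
    · rw [if_pos hm]
      have : k0 ∈ rest := by
        rcases List.mem_cons.mp hk0 with h | h
        · exact absurd hm (h ▸ hk0l)
        · exact h
      exact ih (fun x hx => hk x (List.mem_cons_of_mem _ hx)) b ⟨k0, this, hk0l⟩
    · rw [if_neg hm]
      by_cases hlt : b.2 < cnt k
      · rw [if_pos hlt]
        exact pvSel_mono l cnt hcnt fb hfb rest (fun x hx => hk x (List.mem_cons_of_mem _ hx)) _ (hcnt k)
      · rw [if_neg hlt]
        exact pvSel_mono l cnt hcnt fb hfb rest (fun x hx => hk x (List.mem_cons_of_mem _ hx)) b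
          (le_of_not_gt (by simpa using fun h => hlt (lt_of_lt_of_le h (hcnt k))))

lemma pvExists_unchosen (l : List Int) (_hl : pvInv l) (hlen : l.length < 26) :
    ∃ k : Nat, k < 26 ∧ (k : Int) ∉ l := by
  by_contra h
  simp only [not_exists, not_and, not_not] at h
  have hsub : ((List.range 26).map (fun k : Nat => (k : Int))) ⊆ l := by
    intro x hx
    rcases List.mem_map.mp hx with ⟨k, hk, rfl⟩
    exact h k (List.mem_range.mp hk)
  have hnd : ((List.range 26).map (fun k : Nat => (k : Int))).Nodup := by
    refine List.Nodup.map ?_ List.nodup_range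
    intro a b hab
    simpa using hab
  have := (List.subperm_of_subset hnd hsub).length_le
  simp at this
  omega

lemma pvMem_strOfId (l : List Int) (hl : pvInv l) (k : Nat) (hk : k < 26) :
    String.ofList [Char.ofNat (65 + k)] ∈ l.map pvStrOfId ↔ (k : Int) ∈ l := by
  have hstr : String.ofList [Char.ofNat (65 + k)] = pvStrOfId (k : Int) := by
    unfold pvStrOfId
    rw [show ((k : Int) + 65).toNat = 65 + k from by omega]
  rw [hstr]
  constructor
  · intro hmem
    rcases List.mem_map.mp hmem with ⟨x, hx, hxe⟩
    have hb := hl.2 x hx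
    have := pvStrOfId_inj x (k : Int) hb.1 hb.2 (by omega) (by exact_mod_cast hk) hxe
    rwa [← this]
  · intro hmem
    exact List.mem_map.mpr ⟨(k : Int), hmem, rfl⟩

-- A's candidate scan, reindexed over 0..25
def pvFA (ct : String) (nn : Int) (l : List Int) (acc : String × Int) (k : Nat) : String × Int :=
  if String.ofList [Char.ofNat (65 + k)] ∉ l.map pvStrOfId then
    let c := pvNumGrams ct nn (l.map pvStrOfId) (Char.ofNat (65 + k))
    if acc.2 < c then (String.ofList [Char.ofNat (65 + k)], c) else acc
  else acc

-- B's candidate scan, reindexed over 0..25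
def pvFB (chosen : Int → Bool) (cnt : Int → Int) (best : Int × Int) (k : Nat) : Int × Int :=
  if chosen (k : Int) = false ∧ best.2 < cnt (k : Int) then ((k : Int), cnt (k : Int)) else best

lemma pvStepA_eq (ct : String) (nn : Int) (l : List Int) :
    pvStepA ct nn (l.map pvStrOfId) =
      (l.map pvStrOfId) ++ [((List.range 26).foldl (pvFA ct nn l) ("", -1)).1] := by
  unfold pvStepA
  rw [show "ABCDEFGHIJKLMNOPQRSTUVWXYZ".toList = (List.range 26).map (fun j => Char.ofNat (65 + j))
    from by decide, List.foldl_map]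
  rfl

lemma pvSelect_eq (chosen : Int → Bool) (cnt : Int → Int) :
    pvSelect chosen cnt = (List.range 26).foldl (pvFB chosen cnt) (-1, -1) := by
  unfold pvSelect
  rw [show PySem.List.pyRange 0 26 1 = (List.range 26).map (fun j : Nat => (j : Int)) from by decide,
    List.foldl_map]
  rfl

-- one round: A and B append the same letter and the state invariants carry to l ++ [j]
lemma pvStep_eq (ct : String) (nn : Int) (l : List Int) (cnt : Int → Int)
    (hl : pvInv l) (hlen : l.length < 26)
    (hcnt : ∀ c : Int, c ∉ l → cnt c = pvM (pvGrams0 ct nn) l c) :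
    ∃ b : Int, 0 ≤ b ∧ b < 26 ∧ b ∉ l ∧
      pvStepA ct nn (l.map pvStrOfId) = (l ++ [b]).map pvStrOfId ∧
      pvRound (l.map pvStrOfId, pvChosenOf l, cnt, pvMissOf (pvGrams0 ct nn) l) =
        ((l ++ [b]).map pvStrOfId, pvChosenOf (l ++ [b]),
          (pvUpdate b cnt (pvMissOf (pvGrams0 ct nn) l)).1, pvMissOf (pvGrams0 ct nn) (l ++ [b])) ∧
      (∀ c : Int, c ∉ l ++ [b] →
        (pvUpdate b cnt (pvMissOf (pvGrams0 ct nn) l)).1 c = pvM (pvGrams0 ct nn) (l ++ [b]) c) := by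
  classical
  have hstr : ∀ k : Nat, String.ofList [Char.ofNat (65 + k)] = pvStrOfId (k : Int) := by
    intro k
    unfold pvStrOfId
    rw [show ((k : Int) + 65).toNat = 65 + k from by omega]
  have hKpos : 0 ≤ pvE ct nn + pvK (pvGrams0 ct nn) l := by
    unfold pvE pvK
    have h1 := Int.natCast_nonneg ((pvAll ct nn).countP (fun g => decide (g = [])))
    have h2 := Int.natCast_nonneg ((pvGrams0 ct nn).countP (fun g => decide (pvFmiss l g = [])))
    omega
  have hMpos : ∀ k : Nat, 0 ≤ pvM (pvGrams0 ct nn) l (k : Int) := fun k => Int.natCast_nonneg _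
  have hfa : ∀ (a : String × Int) (k : Nat), k < 26 → pvFA ct nn l a k =
      if (k : Int) ∈ l then a
      else (if a.2 < (pvE ct nn + pvK (pvGrams0 ct nn) l) + pvM (pvGrams0 ct nn) l (k : Int)
            then (pvStrOfId (k : Int), (pvE ct nn + pvK (pvGrams0 ct nn) l) + pvM (pvGrams0 ct nn) l (k : Int))
            else a) := by
    intro a k hk
    unfold pvFA
    by_cases hm : (k : Int) ∈ l
    · rw [if_neg (not_not_intro ((pvMem_strOfId l hl k hk).mpr hm)), if_pos hm]
    · rw [if_pos (fun hmem => hm ((pvMem_strOfId l hl k hk).mp hmem)), if_neg hm]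
      rw [pvNumGrams_eq ct nn l hl k hk, hstr k]
  have hfb : ∀ (bst : Int × Int) (k : Nat), k < 26 → pvFB (pvChosenOf l) cnt bst k =
      if (k : Int) ∈ l then bst
      else (if bst.2 < pvM (pvGrams0 ct nn) l (k : Int)
            then ((k : Int), pvM (pvGrams0 ct nn) l (k : Int)) else bst) := by
    intro bst k _
    unfold pvFB pvChosenOf
    by_cases hm : (k : Int) ∈ l
    · rw [if_pos hm, if_neg (fun hcond => by
        rw [decide_eq_true hm] at hcond
        exact absurd hcond.1 (by simp))]
    · rw [if_neg hm, hcnt (k : Int) hm]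
      by_cases hlt : bst.2 < pvM (pvGrams0 ct nn) l (k : Int)
      · rw [if_pos ⟨decide_eq_false hm, hlt⟩, if_pos hlt]
      · rw [if_neg (fun hcond => hlt hcond.2), if_neg hlt]
  have hksmall : ∀ k ∈ List.range 26, k < 26 := fun k hk => List.mem_range.mp hk
  have hrel := pvSel_rel l (pvE ct nn + pvK (pvGrams0 ct nn) l) hKpos
    (fun k => pvM (pvGrams0 ct nn) l (k : Int)) hMpos (pvFA ct nn l) (pvFB (pvChosenOf l) cnt)
    hfa hfb (List.range 26) hksmall ("", -1) (-1, -1) (Or.inl ⟨rfl, rfl, rfl, rfl⟩)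
  obtain ⟨k0, hk0, hk0l⟩ := pvExists_unchosen l hl hlen
  have hpos := pvSel_pos l (fun k => pvM (pvGrams0 ct nn) l (k : Int)) hMpos
    (pvFB (pvChosenOf l) cnt) hfb (List.range 26) hksmall (-1, -1)
    ⟨k0, List.mem_range.mpr hk0, hk0l⟩
  rcases hrel with ⟨_, hB2, _, _⟩ | ⟨j, hj26, hjl, hA1, hB1, _, _⟩
  · rw [hB2] at hpos
    omega
  · have hbest : (pvSelect (pvChosenOf l) cnt).1 = (j : Int) := by
      rw [pvSelect_eq]
      exact hB1
    refine ⟨(j : Int), by omega, by exact_mod_cast hj26, hjl, ?_, ?_, ?_⟩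
    · rw [pvStepA_eq, hA1, List.map_append]
      rfl
    · unfold pvRound
      rw [Prod.mk.injEq, Prod.mk.injEq, Prod.mk.injEq]
      refine ⟨?_, ?_, ?_, ?_⟩
      · rw [hbest, List.map_append]
        rfl
      · rw [hbest]
        funext t
        by_cases ht : t = (j : Int)
        · simp [pvChosenOf, ht]
        · simp [pvChosenOf, ht]
      · rw [hbest]
      · rw [hbest]
        unfold pvUpdate
        rw [(pvUpdate_aux (j : Int) (pvMissOf (pvGrams0 ct nn) l) cnt []).2, List.nil_append]
        exact pvMissOf_step (pvGrams0 ct nn) l (j : Int)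
    · intro c hc
      have hcl : c ∉ l := fun h => hc (List.mem_append.mpr (Or.inl h))
      have hcj : c ≠ (j : Int) := fun h => hc (List.mem_append.mpr (Or.inr (by simp [h])))
      unfold pvUpdate
      rw [(pvUpdate_aux (j : Int) (pvMissOf (pvGrams0 ct nn) l) cnt []).1 c,
        hcnt c hcl, pvM_step (pvGrams0 ct nn) l (j : Int) c hcj]

-- main loop correspondence
lemma pvLoop_eq (ct : String) (nn : Int) :
    ∀ (m : Nat) (l : List Int) (cnt : Int → Int), pvInv l → l.length + m = 26 →
      (∀ c : Int, c ∉ l → cnt c = pvM (pvGrams0 ct nn) l c) →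
      pvLoopA ct nn m (l.map pvStrOfId) =
        (pvRound^[m] (l.map pvStrOfId, pvChosenOf l, cnt, pvMissOf (pvGrams0 ct nn) l)).1 := by
  intro m
  induction m with
  | zero => intro l cnt _ _ _; rfl
  | succ m ih =>
    intro l cnt hinv hlen hcnt
    have hlt : (l.map pvStrOfId).length < 26 := by
      rw [List.length_map]
      omega
    rw [show pvLoopA ct nn (m + 1) (l.map pvStrOfId)
        = if (l.map pvStrOfId).length < 26
          then pvLoopA ct nn m (pvStepA ct nn (l.map pvStrOfId)) else (l.map pvStrOfId) from rfl,
      if_pos hlt]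
    obtain ⟨b, hb0, hb26, hbl, hA, hB, hcnt'⟩ := pvStep_eq ct nn l cnt hinv (by omega) hcnt
    rw [hA, Function.iterate_succ_apply, hB]
    refine ih (l ++ [b]) _ ⟨?_, ?_⟩ ?_ hcnt'
    · rw [List.nodup_append]
      refine ⟨hinv.1, List.nodup_singleton _, ?_⟩
      intro a ha
      have : ∀ hab : a = b, False := fun hab => hbl (hab ▸ ha)
      simpa using this
    · intro x hx
      rcases List.mem_append.mp hx with h | h
      · exact hinv.2 x h
      · simp at h
        omega
    · simp
      omega

-- initial state facts
lemma pvGrams0_ne_nil (ct : String) (nn : Int) : ∀ g ∈ pvGrams0 ct nn, g ≠ [] := by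
  intro g hg
  rw [pvGrams0_eq] at hg
  have := List.of_mem_filter hg
  simp only [pvViable, pvPne, Bool.and_eq_true, decide_eq_true_eq] at this
  exact this.1

lemma pvMissOf_nil (ct : String) (nn : Int) : pvMissOf (pvGrams0 ct nn) [] = pvGrams0 ct nn := by
  unfold pvMissOf
  have hmap : (pvGrams0 ct nn).map (pvFmiss []) = pvGrams0 ct nn := by
    conv_rhs => rw [← List.map_id (pvGrams0 ct nn)]
    refine List.map_congr_left ?_
    intro g _
    simp [pvFmiss]
  rw [hmap]
  refine List.filter_eq_self.mpr ?_
  intro g hg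
  exact decide_eq_true (pvGrams0_ne_nil ct nn g hg)

lemma pvInitCount_eq (ct : String) (nn : Int) (c : Int) :
    pvInitCount (pvGrams0 ct nn) c = pvM (pvGrams0 ct nn) [] c := by
  unfold pvInitCount pvM
  rw [pvInitCount_aux]
  have hcp : (pvGrams0 ct nn).countP (fun g => decide (pvFmiss [] g = [c]))
      = (pvGrams0 ct nn).countP (fun g => decide (g = [c])) := by
    refine List.countP_congr ?_
    intro g _
    have : pvFmiss [] g = g := by simp [pvFmiss]
    rw [this]
  rw [hcp]
  ring

-- ===== VERDICT (by name: the statement is the Claim_ definition above) =====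
theorem get_ext_order_spec : Claim_equal_get_ext_order := by
  intro ct nn _
  unfold Spec_get_ext_order get_ext_order get_ext_order_alt
  have hchos : (fun _ : Int => false) = pvChosenOf [] := by
    funext t; simp [pvChosenOf]
  have h := pvLoop_eq ct nn 26 [] (pvInitCount (pvGrams0 ct nn)) ⟨List.nodup_nil, by simp⟩
    (by simp) (fun c _ => pvInitCount_eq ct nn c)
  simp only [List.map_nil, pvMissOf_nil, ← hchos] at h
  rw [h]
  refine congrArg Prod.fst ?_
  rw [List.foldl_const]
  simp
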